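-- pv_equiv track=rewrite | github.com/KC3Kai/kc3-translations | tools/kcwikizh-subtitle-process.py | sort_subtitles_ships
-- ===== SOURCE A (Python) =====
-- def sort_subtitles_ships(subtitles):
--     new_subtitles = {}
--     keys = []
--     for key in subtitles.keys():
--         if key.isnumeric():
--             keys.append(int(key))
--         else:
--             new_subtitles[key] = subtitles[key]
--     keys = sorted(keys)
--     for key in keys:
--         new_subtitles[str(key)] = subtitles[str(key)]
--     return new_subtitles
-- ===== SOURCE B (Python) =====
-- def sort_subtitles_ships(subtitles):
--     def rank(k):
--         return (1, int(k)) if k.isnumeric() else (0, 0)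
--     return {k: subtitles[k] for k in sorted(subtitles, key=rank)}
-- ===== Notes on version B (the rewrite author's own statement) =====
-- stated objective: idiomatic
-- what changed: Replaces A's partition into a dict of non-numeric keys plus a separate int list that is sorted and re-inserted, by a single stable sort of all keys under a tuple key (non-numeric keys first in insertion order, numeric keys after by int value) followed by one dict comprehension keeping keys unchanged; Pre_ excludes dicts containing a numeric key with a leading zero (k != str(int(k))), a corner where A's str(int(k)) round-trip either raises KeyError or merges the key with its normalized form while B keeps it, and either value is defensible.
-- outside the precondition, e.g. on sort_subtitles_ships({'07': 'a', '7': 'b'}): A returns {'7': 'b'}, B returns {'07': 'a', '7': 'b'}; on sort_subtitles_ships({'07': 'a'}): A raises KeyError, B returns {'07': 'a'}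
-- crash fix: On dicts containing a numeric key k with str(int(k)) not itself a key (e.g. {'07':'a'}), A raises KeyError in its second loop; B returns the dict with all keys intact ({'07':'a'}). — e.g. on sort_subtitles_ships([("07", "a")]): A raises KeyError, B returns [("07", "a")]
import Mathlib
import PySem

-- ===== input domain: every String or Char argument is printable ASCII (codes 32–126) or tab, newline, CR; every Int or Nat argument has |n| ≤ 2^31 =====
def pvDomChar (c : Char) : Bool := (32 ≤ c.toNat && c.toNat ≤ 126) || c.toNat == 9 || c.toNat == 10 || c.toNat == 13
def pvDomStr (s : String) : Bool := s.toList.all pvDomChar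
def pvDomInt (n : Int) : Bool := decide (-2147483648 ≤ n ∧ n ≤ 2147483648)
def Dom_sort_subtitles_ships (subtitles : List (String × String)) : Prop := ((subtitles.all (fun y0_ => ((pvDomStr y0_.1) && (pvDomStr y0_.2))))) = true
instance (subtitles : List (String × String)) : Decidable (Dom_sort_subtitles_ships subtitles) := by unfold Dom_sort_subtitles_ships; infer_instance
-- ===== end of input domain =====

-- B replaces A's partition-then-sort with one stable sort of all keys under a (non-numeric first, numeric by int) tuple key and keeps keys unchanged; idiomatic, same cost. Pre_ excludes dicts with a leading-zero numeric key, where A raises KeyError or merge-normalizes the key; Raises_ makes the crash fix checkable.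


-- ===== PORT A =====
-- Python's str.isnumeric coincides with str.isdigit on the printable-ASCII domain; ported as PySem.Str.strIsdigit.
-- dict lookups Python guarantees (or Pre_ guarantees) to hit are ported with getD (the default is never read inside Pre_).
def sort_subtitles_ships (subtitles : List (String × String)) : List (String × String) :=
  let d := PySem.Dict.ofList subtitles
  let st := d.keys.foldl
    (fun (st : PySem.Dict String String × List Int) key =>
      if PySem.Str.strIsdigit key then
        (st.1, st.2 ++ [(PySem.Int.ofStr? key).getD 0])
      else
        (st.1.insert key (d.getD key ""), st.2))
    (PySem.Dict.empty, [])
  let keys := PySem.List.sorted st.2 (fun x => x) false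
  (keys.foldl (fun nd k => nd.insert (PySem.Int.toStr k) (d.getD (PySem.Int.toStr k) "")) st.1).items

-- ===== PORT B =====
def sort_subtitles_ships_alt (subtitles : List (String × String)) : List (String × String) :=
  let d := PySem.Dict.ofList subtitles
  let ks := PySem.List.sorted2 d.keys
    (fun k => if PySem.Str.strIsdigit k then (1 : Int) else 0)
    (fun k => if PySem.Str.strIsdigit k then (PySem.Int.ofStr? k).getD 0 else 0) false
  (ks.foldl (fun r k => r.insert k (d.getD k "")) PySem.Dict.empty).items

-- ===== PRECONDITION & SPEC =====
-- Pre_ excludes dicts containing a numeric key k (e.g. '07') that is not its own int-normalized form str(int(k)):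
-- on such corner inputs A's str(int(k)) round-trip either raises KeyError (when str(int(k)) is not a key) or merges
-- the key with its normalized form, while B keeps every key unchanged — an unspecified corner of a key-sorting pass
-- where either value is defensible.
def Pre_sort_subtitles_ships (subtitles : List (String × String)) : Prop :=
  ∀ p ∈ subtitles, PySem.Str.strIsdigit p.1 = true →
    p.1 = PySem.Int.toStr ((PySem.Int.ofStr? p.1).getD 0)
instance (subtitles : List (String × String)) : Decidable (Pre_sort_subtitles_ships subtitles) := by unfold Pre_sort_subtitles_ships; infer_instance
def pvWitness_sort_subtitles_ships : (List (String × String)) := [("hello", "a"), ("10", "b"), ("2", "c")]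

def Spec_sort_subtitles_ships (subtitles : List (String × String)) (out : List (String × String)) : Prop := out = sort_subtitles_ships_alt subtitles
instance (subtitles : List (String × String)) (out : List (String × String)) : Decidable (Spec_sort_subtitles_ships subtitles out) := by unfold Spec_sort_subtitles_ships; infer_instance

-- On dicts with a numeric key k whose int-normalized form str(int(k)) is not itself a key, A raises KeyError
-- in its second loop; B returns the dict with all keys intact.
def Raises_sort_subtitles_ships (subtitles : List (String × String)) : Prop :=
  ∃ p ∈ subtitles, PySem.Str.strIsdigit p.1 = true ∧
    PySem.Int.toStr ((PySem.Int.ofStr? p.1).getD 0) ∉ subtitles.map Prod.fst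
instance (subtitles : List (String × String)) : Decidable (Raises_sort_subtitles_ships subtitles) := by unfold Raises_sort_subtitles_ships; infer_instance
def pvRaiseWitness_sort_subtitles_ships : (List (String × String)) := [("07", "a")]
def pvRaiseWitnessOut_sort_subtitles_ships : List (String × String) := [("07", "a")]

-- ===== CLAIM (what is proved, stated in full; the proofs are below) =====
def Claim_equal_sort_subtitles_ships : Prop := ∀ (subtitles : List (String × String)), Dom_sort_subtitles_ships subtitles → Pre_sort_subtitles_ships subtitles → Spec_sort_subtitles_ships subtitles (sort_subtitles_ships subtitles)
def Claim_raises_sort_subtitles_ships : Prop := (∀ (subtitles : List (String × String)), Dom_sort_subtitles_ships subtitles → Raises_sort_subtitles_ships subtitles → ¬ Pre_sort_subtitles_ships subtitles) ∧ (Dom_sort_subtitles_ships (pvRaiseWitness_sort_subtitles_ships) ∧ Raises_sort_subtitles_ships (pvRaiseWitness_sort_subtitles_ships) ∧ sort_subtitles_ships_alt (pvRaiseWitness_sort_subtitles_ships) = pvRaiseWitnessOut_sort_subtitles_ships)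

-- ===== LEMMAS AND PROOFS =====

-- insertBy walks past a prefix it is not 'before'.
theorem pv_insertBy_append (before : String → String → Bool) (x : String) (N rest : List String)
    (h : ∀ y ∈ N, before x y = false) :
    PySem.List.insertBy before x (N ++ rest) = N ++ PySem.List.insertBy before x rest := by
  induction N with
  | nil => simp
  | cons y ys ih =>
    simp only [List.cons_append, PySem.List.insertBy, h y (by simp)]
    simp only [Bool.false_eq_true, if_false, List.cons.injEq, true_and]
    exact ih (fun z hz => h z (by simp [hz]))

-- insertBy goes in front when it is 'before' the head (or the list is empty).
theorem pv_insertBy_front (before : String → String → Bool) (x : String) (ys : List String)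
    (h : ∀ y ∈ ys, before x y = true) :
    PySem.List.insertBy before x ys = x :: ys := by
  cases ys with
  | nil => rfl
  | cons y t => simp [PySem.List.insertBy, h y (by simp)]

-- insertBy only tests 'before x ·' on members.
theorem pv_insertBy_congr (before before' : String → String → Bool) (x : String) (ys : List String)
    (h : ∀ y ∈ ys, before x y = before' x y) :
    PySem.List.insertBy before x ys = PySem.List.insertBy before' x ys := by
  induction ys with
  | nil => rfl
  | cons y t ih =>
    simp only [PySem.List.insertBy, h y (by simp)]
    rw [ih (fun z hz => h z (by simp [hz]))]

-- A's first loop splits: the dict collects the non-numeric keys, the list the numeric int values.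
theorem pv_foldl_split (d : PySem.Dict String String) (K : List String)
    (dd : PySem.Dict String String) (ii : List Int) :
    K.foldl
      (fun (st : PySem.Dict String String × List Int) key =>
        if PySem.Str.strIsdigit key then
          (st.1, st.2 ++ [(PySem.Int.ofStr? key).getD 0])
        else
          (st.1.insert key (d.getD key ""), st.2)) (dd, ii)
    = ((K.filter (fun k => !PySem.Str.strIsdigit k)).foldl
         (fun nd k => nd.insert k (d.getD k "")) dd,
       ii ++ (K.filter (fun k => PySem.Str.strIsdigit k)).map
         (fun k => (PySem.Int.ofStr? k).getD 0)) := by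
  induction K generalizing dd ii with
  | nil => simp
  | cons k t ih =>
    simp only [List.foldl_cons, List.filter_cons]
    by_cases hk : PySem.Str.strIsdigit k = true
    · have hk2 : PySem.Chars.strIsdigit k.toList = true := by simpa using hk
      rw [if_pos hk, ih]
      simp [hk2, List.append_assoc]
    · have hk2 : PySem.Chars.strIsdigit k.toList = false := by simpa using hk
      rw [if_neg hk, ih]
      simp [hk2]

-- B's stable sort splits: non-numeric keys first in input order, then numeric keys sorted by int value.
theorem pv_sorted2_split (K : List String) :
    PySem.List.sorted2 K
      (fun k => if PySem.Str.strIsdigit k then (1 : Int) else 0)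
      (fun k => if PySem.Str.strIsdigit k then (PySem.Int.ofStr? k).getD 0 else 0) false
    = K.filter (fun k => !PySem.Str.strIsdigit k)
      ++ PySem.List.sorted (K.filter (fun k => PySem.Str.strIsdigit k))
           (fun k => (PySem.Int.ofStr? k).getD 0) false := by
  induction K using List.reverseRecOn with
  | nil => rfl
  | append_singleton K x ih =>
    rw [PySem.List.sorted_eq_foldl_insertBy] at *
    simp only [PySem.List.sorted2] at *
    simp only [if_neg (by decide : ¬ (false = true)), List.foldl_append, List.foldl_cons,
      List.foldl_nil, List.filter_append, List.filter_cons, List.filter_nil] at *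
    rw [ih]
    by_cases hx : PySem.Str.strIsdigit x = true
    · have hx2 : PySem.Chars.strIsdigit x.toList = true := by simpa using hx
      rw [pv_insertBy_append _ x _ _ ?hN]
      case hN =>
        intro y hy
        have hy2 : PySem.Chars.strIsdigit y.toList = false := by
          have := List.of_mem_filter hy; simpa using this
        simp [hx2, hy2]
      rw [pv_insertBy_congr _ (fun a b => decide ((PySem.Int.ofStr? a).getD 0 < (PySem.Int.ofStr? b).getD 0)) x _ ?hM]
      case hM =>
        intro y hy
        rw [← PySem.List.sorted_eq_foldl_insertBy] at hy
        have hy2 : PySem.Chars.strIsdigit y.toList = true := by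
          have := List.of_mem_filter ((PySem.List.mem_sorted _ _ _ _).1 hy); simpa using this
        simp [hx2, hy2]
      simp [hx2]
    · have hx2 : PySem.Chars.strIsdigit x.toList = false := by simpa using hx
      rw [pv_insertBy_append _ x _ _ ?hN2]
      case hN2 =>
        intro y hy
        have hy2 : PySem.Chars.strIsdigit y.toList = false := by
          have := List.of_mem_filter hy; simpa using this
        simp [hx2, hy2]
      rw [pv_insertBy_front _ x _ ?hM2]
      case hM2 =>
        intro y hy
        rw [← PySem.List.sorted_eq_foldl_insertBy] at hy
        have hy2 : PySem.Chars.strIsdigit y.toList = true := by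
          have := List.of_mem_filter ((PySem.List.mem_sorted _ _ _ _).1 hy); simpa using this
        simp [hx2, hy2]
      simp [hx2]

-- map of a stable key-sort is the sort of the mapped keys.
theorem pv_map_sorted (M : List String) :
    PySem.List.sorted (M.map (fun k => (PySem.Int.ofStr? k).getD 0)) (fun x => x) false
    = (PySem.List.sorted M (fun k => (PySem.Int.ofStr? k).getD 0) false).map
        (fun k => (PySem.Int.ofStr? k).getD 0) := by
  exact PySem.List.sorted_id_eq_of_perm_of_pairwise _ _
    ((PySem.List.sorted_perm M _ false).map _)
    (List.Pairwise.map _ (fun a b h => h) (PySem.List.sorted_pairwise M _))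

-- every key of the dict built from the list is a first component of the list.
theorem pv_keys_sub (subtitles : List (String × String)) (k : String)
    (h : k ∈ (PySem.Dict.ofList subtitles).keys) : k ∈ subtitles.map Prod.fst := by
  have he : PySem.Dict.ofList subtitles
      = subtitles.foldl (fun d p => d.insert p.1 p.2) PySem.Dict.empty := rfl
  rw [he, PySem.Dict.keys_foldl_insert_key] at h
  rw [PySem.Dict.keys_empty, PySem.Set.update_nil_left] at h
  exact (PySem.Set.mem_ofList _ _).1 h

-- ===== VERDICT (by name: the statement is the Claim_ definition above) =====
theorem sort_subtitles_ships_spec : Claim_equal_sort_subtitles_ships := by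
  intro subtitles _ hpre
  unfold Spec_sort_subtitles_ships
  have hnum := hpre
  simp only [sort_subtitles_ships, sort_subtitles_ships_alt]
  rw [pv_foldl_split, pv_sorted2_split, List.foldl_append]
  dsimp only
  rw [List.nil_append, pv_map_sorted, List.foldl_map]
  refine congrArg PySem.Dict.items (PySem.List.foldl_congr_mem _ _ _ _ ?_)
  intro acc k hk
  have hkmem : k ∈ (PySem.Dict.ofList subtitles).keys :=
    List.mem_of_mem_filter ((PySem.List.mem_sorted _ _ _ _).1 hk)
  have hkd : PySem.Str.strIsdigit k = true := by
    have := List.of_mem_filter ((PySem.List.mem_sorted _ _ _ _).1 hk); simpa using this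
  obtain ⟨p, hp, hpk⟩ := List.mem_map.1 (pv_keys_sub subtitles k hkmem)
  have := hnum p hp (hpk ▸ hkd)
  rw [hpk] at this
  rw [← this]

@[simp] theorem sort_subtitles_ships_raises : Claim_raises_sort_subtitles_ships := by
  unfold Claim_raises_sort_subtitles_ships
  refine ⟨?_, by decide⟩
  rintro s _ ⟨p, hp, hd, hnm⟩ hpre
  exact hnm ((hpre p hp hd) ▸ List.mem_map_of_mem hp)
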